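-- pv_equiv track=rewrite | github.com/dipanjansahaa/call_simulation | p91.py | get_next_channel
-- ===== SOURCE A (Python) =====
-- def get_next_channel(channels, channel_queue, base_state, r_value, p_value):
--     for i, state in enumerate(base_state):
--         new_channel = 0
--         if state == 1:
--             channel_queue[(i+1)] -= p_value
--         elif state == 0:
--             channel_queue[(i+1)] += r_value
--             new_channel = i+1
--             return new_channel
--     return i+1
-- ===== SOURCE B (Python) =====
-- def get_next_channel(channels, channel_queue, base_state, r_value, p_value):
--     # Phase 1: pure scan for the first free channel (state == 0), no side effects.
--     zero_pos = next((i for i, s in enumerate(base_state) if s == 0), None)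
--     # Phase 2: decrement the queue of every busy channel scanned before it.
--     end = len(base_state) if zero_pos is None else zero_pos
--     for j in range(end):
--         if base_state[j] == 1:
--             channel_queue[j + 1] -= p_value
--     if zero_pos is None:
--         return len(base_state)
--     channel_queue[zero_pos + 1] += r_value
--     return zero_pos + 1
-- ===== Notes on version B (the rewrite author's own statement) =====
-- stated objective: alternative
-- what changed: A interleaves queue mutations with the search in one loop; B first does a pure scan for the first free channel, then a separate bounded pass decrementing the busy channels' queues, exploiting that all touched keys are distinct.
import Mathlib
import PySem

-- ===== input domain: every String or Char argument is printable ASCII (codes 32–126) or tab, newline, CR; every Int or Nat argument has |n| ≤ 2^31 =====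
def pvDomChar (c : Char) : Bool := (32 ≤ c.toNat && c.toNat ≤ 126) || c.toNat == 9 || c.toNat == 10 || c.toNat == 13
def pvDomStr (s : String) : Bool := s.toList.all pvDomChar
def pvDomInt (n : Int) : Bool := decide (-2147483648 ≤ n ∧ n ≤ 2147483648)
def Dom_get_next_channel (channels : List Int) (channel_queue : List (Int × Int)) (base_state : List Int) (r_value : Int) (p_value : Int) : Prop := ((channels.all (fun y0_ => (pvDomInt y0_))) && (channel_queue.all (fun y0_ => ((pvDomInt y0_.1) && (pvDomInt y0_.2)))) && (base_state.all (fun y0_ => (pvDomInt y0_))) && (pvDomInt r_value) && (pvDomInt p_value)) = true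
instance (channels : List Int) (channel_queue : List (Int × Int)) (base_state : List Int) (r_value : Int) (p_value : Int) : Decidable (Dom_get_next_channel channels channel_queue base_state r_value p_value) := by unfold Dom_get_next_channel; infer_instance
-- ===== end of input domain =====

-- B replaces A's single mutating search loop by a pure scan for the first free channel followed by a
-- separate update pass (same cost, different decomposition). Both A and B mutate channel_queue in
-- place identically on Pre_; the equivalence proved here is about the RETURN value.

-- ===== PORT A =====
-- the loop of A, carrying the current index and the dict state (mutations do not affect the return)
def getNextLoopA (cq : PySem.Dict Int Int) (bs : List Int) (idx : Nat) (r p : Int) : Int :=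
  match bs with
  | [] => Int.ofNat idx            -- 'return i+1' after the loop; idx = last i + 1 (empty input is outside Pre_)
  | s :: rest =>
    if s = 1 then
      getNextLoopA (cq.modify (Int.ofNat (idx+1)) 0 (· - p)) rest (idx+1) r p   -- KeyError inputs are outside Pre_
    else if s = 0 then
      Int.ofNat (idx+1)            -- (the '+= r_value' mutation does not affect the return)
    else getNextLoopA cq rest (idx+1) r p

def get_next_channel (channels : List Int) (channel_queue : List (Int × Int)) (base_state : List Int) (r_value : Int) (p_value : Int) : Int :=
  getNextLoopA (PySem.Dict.mk channel_queue) base_state 0 r_value p_value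

-- ===== PORT B =====
def get_next_channel_alt (channels : List Int) (channel_queue : List (Int × Int)) (base_state : List Int) (r_value : Int) (p_value : Int) : Int :=
  let zero_pos := base_state.findIdx? (fun s => s == 0)
  let endn := match zero_pos with | none => base_state.length | some k => k
  let _cq := (List.range endn).foldl
      (fun d j => if base_state.getD j 0 == 1 then d.modify (Int.ofNat (j+1)) 0 (· - p_value) else d)
      (PySem.Dict.mk channel_queue)
  match zero_pos with
  | none => Int.ofNat base_state.length
  | some k => Int.ofNat (k+1)

-- ===== PRECONDITION & SPEC =====
-- Pre_ excludes exactly the inputs where Python A raises: an empty base_state (NameError) and inputs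
-- where a queue access channel_queue[j+1] happens (state 0 or 1 at an index j not past the first 0)
-- with key j+1 absent (KeyError).
def Pre_get_next_channel (channels : List Int) (channel_queue : List (Int × Int)) (base_state : List Int) (r_value : Int) (p_value : Int) : Prop :=
  base_state ≠ [] ∧
  ∀ j : Nat, j < base_state.length →
    (∀ k : Nat, k < j → base_state.getD k 0 ≠ 0) →
    (base_state.getD j 0 = 0 ∨ base_state.getD j 0 = 1) →
    (channel_queue.map Prod.fst).contains (Int.ofNat (j+1)) = true
instance (channels : List Int) (channel_queue : List (Int × Int)) (base_state : List Int) (r_value : Int) (p_value : Int) : Decidable (Pre_get_next_channel channels channel_queue base_state r_value p_value) := by unfold Pre_get_next_channel; infer_instance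

def pvWitness_get_next_channel : List Int × (List (Int × Int)) × List Int × Int × Int := ([], [(1, 0), (2, 0)], [1, 0], 1, 1)

def Spec_get_next_channel (channels : List Int) (channel_queue : List (Int × Int)) (base_state : List Int) (r_value : Int) (p_value : Int) (out : Int) : Prop := out = get_next_channel_alt channels channel_queue base_state r_value p_value
instance (channels : List Int) (channel_queue : List (Int × Int)) (base_state : List Int) (r_value : Int) (p_value : Int) (out : Int) : Decidable (Spec_get_next_channel channels channel_queue base_state r_value p_value out) := by unfold Spec_get_next_channel; infer_instance


-- ===== CLAIM (what is proved, stated in full; the proofs are below) =====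
def Claim_equal_get_next_channel : Prop := ∀ (channels : List Int) (channel_queue : List (Int × Int)) (base_state : List Int) (r_value : Int) (p_value : Int), Dom_get_next_channel channels channel_queue base_state r_value p_value → Pre_get_next_channel channels channel_queue base_state r_value p_value → Spec_get_next_channel channels channel_queue base_state r_value p_value (get_next_channel channels channel_queue base_state r_value p_value)

-- ===== LEMMAS AND PROOFS =====
-- A's loop returns a value determined only by the position of the first 0 in the remaining list.
theorem getNextLoopA_eq (bs : List Int) : ∀ (idx : Nat) (cq : PySem.Dict Int Int) (r p : Int),
    getNextLoopA cq bs idx r p =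
      match bs.findIdx? (fun s => s == 0) with
      | none => Int.ofNat (idx + bs.length)
      | some k => Int.ofNat (idx + k + 1) := by
  induction bs with
  | nil => intro idx cq r p; simp [getNextLoopA]
  | cons s rest ih =>
    intro idx cq r p
    by_cases h1 : s = 1
    · subst h1
      simp only [getNextLoopA, List.findIdx?_cons, ih]
      norm_num
      cases hf : rest.findIdx? (fun s => s == 0) <;> simp <;> ring_nf
    · by_cases h0 : s = 0
      · subst h0; simp [getNextLoopA, List.findIdx?_cons]
      · simp only [getNextLoopA, h1, h0, List.findIdx?_cons, ih, if_false]
        norm_num [h1, h0]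
        cases hf : rest.findIdx? (fun s => s == 0) <;> simp <;> ring_nf

-- ===== VERDICT (by name: the statement is the Claim_ definition above) =====
theorem get_next_channel_spec : Claim_equal_get_next_channel := by
  intro channels channel_queue base_state r_value p_value _ _
  unfold Spec_get_next_channel get_next_channel get_next_channel_alt
  rw [getNextLoopA_eq]
  cases hf : base_state.findIdx? (fun s => s == 0) <;> simp [hf]
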